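-- pv_equiv track=rewrite | github.com/delaanthonio/hackerrank | algorithm/string/valid_string/solution.py | is_valid_string
-- ===== SOURCE A (Python) =====
-- from collections import defaultdict
--
-- def is_valid_string(string: str) -> bool:
--     """Determine if a string is valid."""
--
--     if not string:
--         return False
--
--     characters = defaultdict(int)
--
--     for char in string:
--         characters[char] += 1
--
--     counts = defaultdict(int)
--
--     for value in characters.values():
--         counts[value] += 1
--
--     if len(counts) == 1:
--         return True
--
--     if len(counts) == 2:
--         return 1 in counts.values()
--
--     return False
-- ===== SOURCE B (Python) =====
-- def is_valid_string(string: str) -> bool: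
--     """Determine if a string is valid."""
--     if not string:
--         return False
--     freq = {}
--     for ch in string:
--         freq[ch] = freq.get(ch, 0) + 1
--     vals = list(freq.values())
--     lo = min(vals)
--     hi = max(vals)
--     if lo == hi:
--         return True
--     if any(v != lo and v != hi for v in vals):
--         return False
--     return vals.count(lo) == 1 or vals.count(hi) == 1
-- ===== Notes on version B (the rewrite author's own statement) =====
-- stated objective: alternative
-- what changed: B drops A's second counting dict (the counts-of-counts histogram) and instead decides validity from min/max of the frequency values plus two count calls over the same value list.
import Mathlib
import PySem

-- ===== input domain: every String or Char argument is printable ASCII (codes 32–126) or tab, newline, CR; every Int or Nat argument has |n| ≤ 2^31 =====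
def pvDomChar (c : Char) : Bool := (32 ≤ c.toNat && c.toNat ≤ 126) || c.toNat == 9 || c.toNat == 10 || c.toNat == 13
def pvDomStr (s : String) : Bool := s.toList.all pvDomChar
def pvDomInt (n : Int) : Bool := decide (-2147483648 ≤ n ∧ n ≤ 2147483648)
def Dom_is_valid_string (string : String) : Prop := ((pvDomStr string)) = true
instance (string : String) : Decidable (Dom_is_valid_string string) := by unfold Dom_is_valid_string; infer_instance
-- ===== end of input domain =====

-- B replaces A's second counting dict (counts-of-counts) by a min/max scan over the
-- frequency values plus two count calls — a different decomposition of the same test (objective: alternative).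

-- ===== PORT A =====
def is_valid_string (string : String) : Bool :=
  let L := string.toList
  if L = [] then false
  else
    let characters := L.foldl (fun d c => d.modify c 0 (· + (1:Int))) PySem.Dict.empty
    let counts := characters.values.foldl (fun d v => d.modify v 0 (· + (1:Int))) PySem.Dict.empty
    if counts.size = 1 then true
    else if counts.size = 2 then decide ((1:Int) ∈ counts.values)
    else false

-- ===== PORT B =====
def is_valid_string_alt (string : String) : Bool :=
  let L := string.toList
  if L = [] then false
  else
    let freq := L.foldl (fun d c => d.insert c (d.getD c 0 + (1:Int))) PySem.Dict.empty
    let vals := freq.values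
    -- vals is nonempty under the guard, so `.getD 0` never supplies the default
    let lo : Int := (PySem.List.min? vals (fun v => v)).getD 0
    let hi : Int := (PySem.List.max? vals (fun v => v)).getD 0
    if lo = hi then true
    else if vals.any (fun v => decide (v ≠ lo ∧ v ≠ hi)) then false
    else decide (vals.count lo = 1 ∨ vals.count hi = 1)

-- ===== PRECONDITION & SPEC =====
def Spec_is_valid_string (string : String) (out : Bool) : Prop := out = is_valid_string_alt string
instance (string : String) (out : Bool) : Decidable (Spec_is_valid_string string out) := by unfold Spec_is_valid_string; infer_instance

-- ===== CLAIM (what is proved, stated in full; the proofs are below) =====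
def Claim_equal_is_valid_string : Prop := ∀ (string : String), Dom_is_valid_string string → Spec_is_valid_string string (is_valid_string string)

-- ===== LEMMAS AND PROOFS =====

-- The common tail: A's counts-of-counts decision equals B's min/max decision on any
-- nonempty list of frequency values.
theorem pv_tails_eq (V : List Int) (hV : V ≠ []) :
    (let counts := V.foldl (fun d v => d.modify v 0 (· + (1:Int))) PySem.Dict.empty
     if counts.size = 1 then true
     else if counts.size = 2 then decide ((1:Int) ∈ counts.values)
     else false)
    =
    (let lo : Int := (PySem.List.min? V (fun v => v)).getD 0
     let hi : Int := (PySem.List.max? V (fun v => v)).getD 0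
     if lo = hi then true
     else if V.any (fun v => decide (v ≠ lo ∧ v ≠ hi)) then false
     else decide (V.count lo = 1 ∨ V.count hi = 1)) := by
  obtain ⟨m, hm⟩ : ∃ m, PySem.List.min? V (fun v => v) = some m := by
    cases hmo : PySem.List.min? V (fun v => v) with
    | none => exact absurd ((PySem.List.min?_eq_none_iff V (fun v => v)).mp hmo) hV
    | some m => exact ⟨m, rfl⟩
  obtain ⟨M, hM⟩ : ∃ M, PySem.List.max? V (fun v => v) = some M := by
    cases hMo : PySem.List.max? V (fun v => v) with
    | none => exact absurd ((PySem.List.max?_eq_none_iff V (fun v => v)).mp hMo) hV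
    | some M => exact ⟨M, rfl⟩
  have hmV : m ∈ V := PySem.List.min?_mem hm
  have hMV : M ∈ V := PySem.List.max?_mem hM
  have hmin : ∀ y ∈ V, m ≤ y := PySem.List.min?_isMin hm
  have hmax : ∀ y ∈ V, y ≤ M := PySem.List.max?_isMax hM
  obtain ⟨D, hDdef⟩ : ∃ D, PySem.Set.ofList V = D := ⟨_, rfl⟩
  have hmemD : ∀ x : Int, x ∈ D ↔ x ∈ V := by
    intro x; rw [← hDdef]; exact PySem.Set.mem_ofList V x
  have hnd : D.Nodup := hDdef ▸ PySem.Set.nodup_ofList V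
  have hcnt : V.foldl (fun d v => d.modify v 0 (· + (1:Int))) PySem.Dict.empty
      = PySem.Dict.counter V := (PySem.Dict.counter_eq_foldl V).symm
  have hsize : (PySem.Dict.counter V).size = D.length := by
    simp [PySem.Dict.size, PySem.Dict.items_counter, hDdef]
  have hvals : (PySem.Dict.counter V).values = D.map (fun k => (V.count k : Int)) := by
    simp [PySem.Dict.values, PySem.Dict.items_counter, hDdef]
  simp only [hcnt, hsize, hvals, hm, hM, Option.getD_some]
  have helem : ∀ v ∈ V, v ∈ D := fun v hv => (hmemD v).mpr hv
  rcases D with _ | ⟨a, _ | ⟨b, _ | ⟨c, rest⟩⟩⟩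
  · -- impossible: V nonempty
    obtain ⟨v, t, rfl⟩ := List.exists_cons_of_ne_nil hV
    simpa using helem v (by simp)
  · -- one distinct value: both sides true
    have hma : m = a := by simpa using helem m hmV
    have hMa : M = a := by simpa using helem M hMV
    simp [hma, hMa]
  · -- two distinct values
    have hab : a ≠ b := by simp [List.nodup_cons] at hnd; tauto
    have ha : a ∈ V := (hmemD a).mp (by simp)
    have hb : b ∈ V := (hmemD b).mp (by simp)
    have hm2 : m = a ∨ m = b := by simpa using helem m hmV
    have hM2 : M = a ∨ M = b := by simpa using helem M hMV
    have hneq : m ≠ M := by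
      intro hEq
      have h1 := hmin a ha; have h2 := hmax a ha
      have h3 := hmin b hb; have h4 := hmax b hb
      exact hab (by omega)
    have helem2 : ∀ v ∈ V, v = a ∨ v = b := fun v hv => by simpa using helem v hv
    rw [if_neg hneq]
    rcases hm2 with rfl | rfl <;> rcases hM2 with hM2 | hM2
    · exact absurd hM2.symm hneq
    · subst hM2
      have hany : V.any (fun v => decide (v ≠ m ∧ v ≠ M)) = false := by
        rw [List.any_eq_false]
        intro v hv
        rcases helem2 v hv with rfl | rfl <;> simp
      rw [hany]
      simp only [Bool.false_eq_true, if_false, List.map_cons, List.map_nil,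
        List.mem_cons, List.not_mem_nil, or_false]
      apply decide_eq_decide.mpr
      omega
    · subst hM2
      have hany : V.any (fun v => decide (v ≠ m ∧ v ≠ M)) = false := by
        rw [List.any_eq_false]
        intro v hv
        rcases helem2 v hv with rfl | rfl <;> simp
      rw [hany]
      simp only [Bool.false_eq_true, if_false, List.map_cons, List.map_nil,
        List.mem_cons, List.not_mem_nil, or_false]
      apply decide_eq_decide.mpr
      omega
    · exact absurd hM2.symm hneq
  · -- three or more distinct values: both sides false
    have hnd' : a ≠ b ∧ a ≠ c ∧ b ≠ c := by
      simp [List.nodup_cons] at hnd; tauto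
    obtain ⟨hab, hac, hbc⟩ := hnd'
    have ha : a ∈ V := (hmemD a).mp (by simp)
    have hb : b ∈ V := (hmemD b).mp (by simp)
    have hc : c ∈ V := (hmemD c).mp (by simp)
    have hneq : m ≠ M := by
      intro hEq
      have h1 := hmin a ha; have h2 := hmax a ha
      have h3 := hmin b hb; have h4 := hmax b hb
      exact hab (by omega)
    have hex : ∃ v, v ∈ V ∧ v ≠ m ∧ v ≠ M := by
      by_contra hcon
      push Not at hcon
      have Ha : a = m ∨ a = M := (eq_or_ne a m).imp_right (hcon a ha)
      have Hb : b = m ∨ b = M := (eq_or_ne b m).imp_right (hcon b hb)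
      have Hc : c = m ∨ c = M := (eq_or_ne c m).imp_right (hcon c hc)
      rcases Ha with h1 | h1 <;> rcases Hb with h2 | h2 <;> rcases Hc with h3 | h3 <;> omega
    obtain ⟨v, hvV, hv1, hv2⟩ := hex
    have hany : V.any (fun v => decide (v ≠ m ∧ v ≠ M)) = true :=
      List.any_eq_true.mpr ⟨v, hvV, by simp [hv1, hv2]⟩
    rw [if_neg hneq, hany]
    simp

-- The frequency dict of a nonempty string has a nonempty value list.
theorem pv_values_ne_nil (L : List Char) (h : L ≠ []) :
    (PySem.Dict.counter L).values ≠ [] := by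
  obtain ⟨x, t, rfl⟩ := List.exists_cons_of_ne_nil h
  intro hcon
  have hx : x ∈ PySem.Set.ofList (x :: t) := (PySem.Set.mem_ofList _ x).mpr (by simp)
  have hlen : (PySem.Dict.counter (x :: t)).values.length
      = (PySem.Set.ofList (x :: t)).length := by
    simp [PySem.Dict.values, PySem.Dict.items_counter]
  rcases hD : PySem.Set.ofList (x :: t) with _ | _
  · rw [hD] at hx; simp at hx
  · rw [hcon, hD] at hlen; simp at hlen

-- ===== VERDICT (by name: the statement is the Claim_ definition above) =====
theorem is_valid_string_spec : Claim_equal_is_valid_string := by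
  intro s _
  unfold Spec_is_valid_string is_valid_string is_valid_string_alt
  by_cases h : s.toList = []
  · simp [h]
  · simp only [h, if_false]
    exact pv_tails_eq ((PySem.Dict.counter s.toList).values) (pv_values_ne_nil _ h)
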